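-- pv_equiv track=rewrite | github.com/chienhsiang-hung/LeetCode-Solutions | problems/where_will_the_ball_fall/solution.py | findBall
-- ===== SOURCE A (Python) =====
-- from typing import List
--
-- def findBall(grid: List[List[int]]) -> List[int]:
--     answer = [-1] * len(grid[0])
--     routes = []
--     # check the entries
--     for c in range( len(grid[0]) -1 ):
--         if grid[0][c] == grid[0][c+1] == 1:
--             routes.append({
--                 'row': 1,
--                 'c': c,
--                 'answer_pos': c,
--                 'dir': 1
--             })
--         elif grid[0][c] == grid[0][c+1] == -1:
--             routes.append({
--                 'row': 1,
--                 'c': c,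
--                 'answer_pos': c+1,
--                 'dir': -1
--             })
--
--     # check the following routes
--     for r in range( 1, len(grid) ):
--
--         while routes:
--             if routes[0]['row'] != r:
--                 break
--
--             current = routes.pop(0)
--
--             c = current['c']
--             answer_pos = current['answer_pos']
--             _dir = current['dir']
--
--             # record the right path
--             if _dir == 1:
--                 if c+2 <= len(grid[0])-1:
--                     # go right
--                     if grid[r][c+1] == grid[r][c+2] == 1:
--                         routes.append({
--                             'row': r+1,
--                             'c': c+1,
--                             'answer_pos': answer_pos,
--                             'dir': 1
--                         })
--                         continue
--                 # go left
--                 if grid[r][c] == grid[r][c+1] == -1: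
--                     routes.append({
--                         'row': r+1,
--                         'c': c,
--                         'answer_pos': answer_pos,
--                         'dir': -1
--                     })
--             # record the left path
--             else:
--                 if c-1 >= 0:
--                     # go left
--                     if grid[r][c] == grid[r][c-1] == -1:
--                         routes.append({
--                             'row': r+1,
--                             'c': c-1,
--                             'answer_pos': answer_pos,
--                             'dir': -1
--                         })
--                         continue
--                 # go right
--                 if grid[r][c] == grid[r][c+1] == 1:
--                     routes.append({
--                         'row': r+1,
--                         'c': c,
--                         'answer_pos': answer_pos,
--                         'dir': 1
--                     })
--     for route in routes:
--         if route['dir'] == 1: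
--             answer[ route['answer_pos'] ] = route['c']+1
--         else:
--             answer[ route['answer_pos'] ] = route['c']
--
--     return answer
-- ===== SOURCE B (Python) =====
-- from typing import List
--
-- def findBall(grid: List[List[int]]) -> List[int]:
--     n = len(grid[0])
--     cols = [c for c in range(n)]  # current column of each ball, or None once stuck
--     for row in grid:
--         new_cols = []
--         for c in cols:
--             if c is None:
--                 new_cols.append(None)
--             elif c + 1 < n and row[c] == 1 and row[c + 1] == 1:
--                 new_cols.append(c + 1)
--             elif c - 1 >= 0 and row[c] == -1 and row[c - 1] == -1:
--                 new_cols.append(c - 1)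
--             else:
--                 new_cols.append(None)
--         cols = new_cols
--     return [-1 if c is None else c for c in cols]
-- ===== Notes on version B (the rewrite author's own statement) =====
-- stated objective: alternative
-- what changed: Replaces A's single FIFO queue of dict 'routes' (seeded by a special row-0 pass, popped with pop(0) and re-appended per row, then written back into the answer array) with a uniform row-by-row sweep that keeps one Optional column per ball and maps every row over that fixed-size state.
-- outside the precondition, e.g. on findBall([[5, 7], [3]]): A returns [-1, -1], B returns [-1, -1]; on findBall([[-1, -1, 1], [1, 1]]): A returns [-1, 1, -1], B returns [-1, 1, -1]
import Mathlib
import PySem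

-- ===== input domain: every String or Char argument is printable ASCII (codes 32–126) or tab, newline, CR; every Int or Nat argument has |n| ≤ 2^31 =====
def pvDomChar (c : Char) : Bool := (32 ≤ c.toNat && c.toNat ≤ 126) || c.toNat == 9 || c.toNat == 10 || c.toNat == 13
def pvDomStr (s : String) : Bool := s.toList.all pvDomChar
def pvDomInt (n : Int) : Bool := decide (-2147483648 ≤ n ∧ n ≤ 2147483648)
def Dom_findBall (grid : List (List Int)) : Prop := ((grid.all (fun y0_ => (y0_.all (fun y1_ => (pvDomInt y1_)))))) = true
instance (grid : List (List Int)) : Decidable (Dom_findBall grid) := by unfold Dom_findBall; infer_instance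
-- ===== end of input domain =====

-- B replaces A's FIFO queue of route dicts (seeded by a special row-0 pass, popped and
-- re-appended per row, then written back into the answer) with a uniform row-by-row sweep
-- mapping each row over one Optional column per ball (an alternative of similar cost).

-- ===== PORT A =====
-- grid[r][c] read (in range on every read A performs inside Pre_)
def pvGetI (row : List Int) (i : Int) : Int := PySem.List.pyGetD row i 0

-- answer[i] = v list assignment; exact where 0 ≤ i < len (the only assignments A performs inside Pre_)
def pvSetI (l : List Int) (i : Int) (v : Int) : List Int :=
  if 0 ≤ i ∧ i < (l.length : Int) then l.set i.toNat v else l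

-- the route dict {'row': _, 'c': _, 'answer_pos': _, 'dir': _} used as a record
structure PvRoute where
  row : Int
  c : Int
  ap : Int
  dir : Int
deriving DecidableEq, Repr

-- body of the while loop for one popped route (the two 'continue'-guarded branches)
def pvStepA (n : Int) (row : List Int) (r : Int) (x : PvRoute) : Option PvRoute :=
  if x.dir = 1 then
    if x.c + 2 ≤ n - 1 ∧ pvGetI row (x.c + 1) = 1 ∧ pvGetI row (x.c + 2) = 1 then
      some ⟨r + 1, x.c + 1, x.ap, 1⟩
    else if pvGetI row x.c = -1 ∧ pvGetI row (x.c + 1) = -1 then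
      some ⟨r + 1, x.c, x.ap, -1⟩
    else none
  else
    if x.c - 1 ≥ 0 ∧ pvGetI row x.c = -1 ∧ pvGetI row (x.c - 1) = -1 then
      some ⟨r + 1, x.c - 1, x.ap, -1⟩
    else if pvGetI row x.c = 1 ∧ pvGetI row (x.c + 1) = 1 then
      some ⟨r + 1, x.c, x.ap, 1⟩
    else none

-- 'while routes:' — fuel = queue length + 1 at entry suffices: every route appended during
-- row r carries row number r+1 and therefore triggers the break when it reaches the front
def pvWhileA (n : Int) (row : List Int) (r : Int) : Nat → List PvRoute → List PvRoute
  | 0, routes => routes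
  | fuel + 1, routes =>
    match routes with
    | [] => []
    | x :: rest =>
      if x.row ≠ r then x :: rest
      else
        match pvStepA n row r x with
        | some y => pvWhileA n row r fuel (rest ++ [y])
        | none => pvWhileA n row r fuel rest

def findBall (grid : List (List Int)) : List Int :=
  let row0 := PySem.List.pyGetD grid 0 []
  let n : Int := (row0.length : Int)
  let answer : List Int := List.replicate row0.length (-1)
  let routes0 : List PvRoute := (PySem.List.pyRange 0 (n - 1) 1).foldl (fun acc c =>
    if pvGetI row0 c = 1 ∧ pvGetI row0 (c + 1) = 1 then acc ++ [⟨1, c, c, 1⟩]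
    else if pvGetI row0 c = -1 ∧ pvGetI row0 (c + 1) = -1 then acc ++ [⟨1, c, c + 1, -1⟩]
    else acc) []
  let routes := (PySem.List.pyRange 1 (grid.length : Int) 1).foldl (fun rs r =>
    pvWhileA n (PySem.List.pyGetD grid r []) r (rs.length + 1) rs) routes0
  routes.foldl (fun ans x =>
    if x.dir = 1 then pvSetI ans x.ap (x.c + 1) else pvSetI ans x.ap x.c) answer

-- ===== PORT B =====
def pvStepB (n : Int) (row : List Int) (c : Int) : Option Int :=
  if c + 1 < n ∧ pvGetI row c = 1 ∧ pvGetI row (c + 1) = 1 then some (c + 1)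
  else if c - 1 ≥ 0 ∧ pvGetI row c = -1 ∧ pvGetI row (c - 1) = -1 then some (c - 1)
  else none

def findBall_alt (grid : List (List Int)) : List Int :=
  let n : Int := ((PySem.List.pyGetD grid 0 []).length : Int)
  let init : List (Option Int) := (PySem.List.pyRange 0 n 1).map some
  let final := grid.foldl (fun cols row => cols.map (fun o => o.bind (pvStepB n row))) init
  final.map (fun o => o.getD (-1))

-- ===== PRECONDITION & SPEC =====
-- Pre_ excludes the empty grid (A raises IndexError on grid[0]) and grids with a row
-- shorter than row 0, on which A (sizing everything by row 0) can raise IndexError.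
def Pre_findBall (grid : List (List Int)) : Prop :=
  grid ≠ [] ∧ ∀ row ∈ grid, grid.headI.length ≤ row.length
instance (grid : List (List Int)) : Decidable (Pre_findBall grid) := by
  unfold Pre_findBall; infer_instance

def pvWitness_findBall : List (List Int) := [[1, 1, -1], [-1, -1, 1], [1, 1, 1]]

def Spec_findBall (grid : List (List Int)) (out : List Int) : Prop := out = findBall_alt grid
instance (grid : List (List Int)) (out : List Int) : Decidable (Spec_findBall grid out) := by
  unfold Spec_findBall; infer_instance

-- ===== CLAIM (what is proved, stated in full; the proofs are below) =====
def Claim_equal_findBall : Prop := ∀ (grid : List (List Int)), Dom_findBall grid → Pre_findBall grid → Spec_findBall grid (findBall grid)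

-- ===== LEMMAS AND PROOFS =====

-- survivors of B's state with their ball indices, in index order
def pvSurv : Int → List (Option Int) → List (Int × Int)
  | _, [] => []
  | i, none :: t => pvSurv (i + 1) t
  | i, some p :: t => (i, p) :: pvSurv (i + 1) t

-- A's route x represents the ball with answer slot ip.1 currently at column ip.2 in row r
def PvRel (n r : Int) (x : PvRoute) (ip : Int × Int) : Prop :=
  x.row = r ∧ x.ap = ip.1 ∧
  ((x.dir = 1 ∧ x.c = ip.2 - 1 ∧ 1 ≤ ip.2 ∧ ip.2 ≤ n - 1) ∨
   (x.dir = -1 ∧ x.c = ip.2 ∧ 0 ≤ ip.2 ∧ ip.2 ≤ n - 2))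

-- pointwise relation on Option results
def PvORel {α β : Type} (R : α → β → Prop) : Option α → Option β → Prop
  | none, none => True
  | some a, some b => R a b
  | _, _ => False

theorem pv_forall₂_filterMap {α β α' β' : Type} {R : α → β → Prop} {R' : α' → β' → Prop}
    {f : α → Option α'} {g : β → Option β'}
    (H : ∀ a b, R a b → PvORel R' (f a) (g b)) :
    ∀ {as : List α} {bs : List β}, List.Forall₂ R as bs →
      List.Forall₂ R' (as.filterMap f) (bs.filterMap g) := by
  intro as bs hab
  induction hab with
  | nil => exact List.Forall₂.nil
  | @cons a b as' bs' h1 h2 ih =>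
    have hr := H a b h1
    cases hfa : f a <;> cases hgb : g b <;>
      rw [hfa, hgb] at hr <;>
      simp only [List.filterMap_cons, hfa, hgb]
    · exact ih
    · exact hr.elim
    · exact hr.elim
    · exact List.Forall₂.cons hr ih

theorem pv_step_row_eq {n : Int} {row : List Int} {r : Int} {x : PvRoute} {y : PvRoute}
    (h : pvStepA n row r x = some y) : y.row = r + 1 := by
  unfold pvStepA at h
  split_ifs at h <;> cases h <;> rfl

theorem pv_step_rel (n : Int) (row : List Int) (r : Int) (x : PvRoute) (ip : Int × Int)
    (h : PvRel n r x ip) :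
    PvORel (PvRel n (r + 1)) (pvStepA n row r x)
      ((pvStepB n row ip.2).map (fun p => (ip.1, p))) := by
  obtain ⟨i, p⟩ := ip
  obtain ⟨xr, xc, xap, xd⟩ := x
  obtain ⟨hrow, hap, hcase⟩ := h
  simp only at hrow hap
  subst hrow; subst hap
  rcases hcase with ⟨hd, hc, h1, h2⟩ | ⟨hd, hc, h1, h2⟩ <;> simp only at hd hc h1 h2 <;>
    subst hd <;> subst hc <;> unfold pvStepA pvStepB <;> dsimp only
  · -- dir = 1, ball at column p, route column p - 1
    rw [show p - 1 + 1 = p by ring, show p - 1 + 2 = p + 1 by ring]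
    simp only [show (p + 1 ≤ n - 1 ∧ pvGetI row p = 1 ∧ pvGetI row (p + 1) = 1) ↔
          (p + 1 < n ∧ pvGetI row p = 1 ∧ pvGetI row (p + 1) = 1) from
        (by constructor <;> rintro ⟨a, b, c⟩ <;> exact ⟨by omega, b, c⟩),
      show (pvGetI row (p - 1) = -1 ∧ pvGetI row p = -1) ↔
          (p - 1 ≥ 0 ∧ pvGetI row p = -1 ∧ pvGetI row (p - 1) = -1) from
        (by constructor
            · rintro ⟨a, b⟩; exact ⟨by omega, b, a⟩
            · rintro ⟨a, b, c⟩; exact ⟨c, b⟩)]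
    split_ifs <;> simp only [Option.map_some, Option.map_none] <;>
      first
        | trivial
        | (refine ⟨rfl, rfl, Or.inl ?_⟩; dsimp only; exact ⟨by omega, by omega, by omega, by omega⟩)
        | (refine ⟨rfl, rfl, Or.inr ?_⟩; dsimp only; exact ⟨by omega, by omega, by omega, by omega⟩)
  · -- dir = -1, ball at column xc = route column
    simp only [show (xc + 1 < n ∧ pvGetI row xc = 1 ∧ pvGetI row (xc + 1) = 1) ↔
          (pvGetI row xc = 1 ∧ pvGetI row (xc + 1) = 1) from
        (by constructor
            · rintro ⟨-, a, b⟩; exact ⟨a, b⟩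
            · rintro ⟨a, b⟩; exact ⟨by omega, a, b⟩)]
    split_ifs <;> simp only [Option.map_some, Option.map_none] <;>
      first
        | trivial
        | (refine ⟨rfl, rfl, Or.inl ?_⟩; dsimp only; exact ⟨by omega, by omega, by omega, by omega⟩)
        | (refine ⟨rfl, rfl, Or.inr ?_⟩; dsimp only; exact ⟨by omega, by omega, by omega, by omega⟩)

theorem pvSurv_map_bind (f : Int → Option Int) :
    ∀ (st : List (Option Int)) (i : Int),
      pvSurv i (st.map (fun o => o.bind f)) =
        (pvSurv i st).filterMap (fun ip => (f ip.2).map (fun p => (ip.1, p))) := by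
  intro st
  induction st with
  | nil => intro i; rfl
  | cons o t ih =>
    intro i
    cases o with
    | none => simpa [pvSurv] using ih (i + 1)
    | some p =>
      cases hf : f p <;>
        simp [pvSurv, hf, ih (i + 1)]

theorem pvWhileA_eq (n : Int) (row : List Int) (r : Int) :
    ∀ (pending done : List PvRoute) (fuel : Nat),
      (∀ x ∈ pending, x.row = r) → (∀ x ∈ done, x.row = r + 1) →
      pending.length < fuel →
      pvWhileA n row r fuel (pending ++ done) =
        done ++ pending.filterMap (pvStepA n row r) := by
  intro pending
  induction pending with
  | nil =>
    intro done fuel _ hdone hfuel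
    obtain ⟨f, rfl⟩ : ∃ f, fuel = f + 1 := ⟨fuel - 1, by omega⟩
    cases done with
    | nil => rfl
    | cons d ds =>
      have hd : d.row = r + 1 := hdone d (by simp)
      simp only [List.nil_append, pvWhileA, List.filterMap_nil, List.append_nil]
      rw [if_pos (by omega)]
  | cons p ps ih =>
    intro done fuel hpend hdone hfuel
    obtain ⟨f, rfl⟩ : ∃ f, fuel = f + 1 := ⟨fuel - 1, by omega⟩
    have hp : p.row = r := hpend p (by simp)
    simp only [List.cons_append, pvWhileA]
    rw [if_neg (by omega)]
    cases hstep : pvStepA n row r p with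
    | none =>
      rw [List.filterMap_cons, hstep]
      dsimp only
      exact ih done f (fun x hx => hpend x (by simp [hx])) hdone (by simp at hfuel ⊢; omega)
    | some y =>
      rw [List.filterMap_cons, hstep]
      dsimp only
      have : ps ++ done ++ [y] = ps ++ (done ++ [y]) := by simp
      rw [this, ih (done ++ [y]) f (fun x hx => hpend x (by simp [hx]))
        (by intro x hx; rcases List.mem_append.1 hx with h' | h'
            · exact hdone x h'
            · simp at h'; subst h'; exact pv_step_row_eq hstep)
        (by simp at hfuel ⊢; omega)]
      simp

theorem pv_row_preserve (n r : Int) (row : List Int) {routes : List PvRoute}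
    {st : List (Option Int)} (h : List.Forall₂ (PvRel n r) routes (pvSurv 0 st)) :
    List.Forall₂ (PvRel n (r + 1)) (pvWhileA n row r (routes.length + 1) routes)
      (pvSurv 0 (st.map (fun o => o.bind (pvStepB n row)))) := by
  have hrows : ∀ x ∈ routes, x.row = r := by
    have : ∀ {as : List PvRoute} {bs : List (Int × Int)},
        List.Forall₂ (PvRel n r) as bs → ∀ x ∈ as, x.row = r := by
      intro as bs hab
      induction hab with
      | nil => intro x hx; cases hx
      | @cons a b as' bs' h1 h2 ih =>
        intro x hx
        rcases List.mem_cons.1 hx with rfl | hx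
        · exact h1.1
        · exact ih x hx
    exact this h
  have hw := pvWhileA_eq n row r routes [] (routes.length + 1) hrows
    (by intro x hx; cases hx) (by omega)
  rw [List.append_nil] at hw
  rw [hw, List.nil_append, pvSurv_map_bind]
  exact pv_forall₂_filterMap (fun a b hab => pv_step_rel n row r a b hab) h

theorem pv_outer (n : Int) (grid : List (List Int)) :
    ∀ (k : Nat) (routes : List PvRoute) (st : List (Option Int)),
      k ≤ grid.length →
      List.Forall₂ (PvRel n (k : Int)) routes (pvSurv 0 st) →
      List.Forall₂ (PvRel n (grid.length : Int))
        ((PySem.List.pyRange (k : Int) (grid.length : Int) 1).foldl (fun rs r =>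
          pvWhileA n (PySem.List.pyGetD grid r []) r (rs.length + 1) rs) routes)
        (pvSurv 0 ((grid.drop k).foldl (fun cols row =>
          cols.map (fun o => o.bind (pvStepB n row))) st)) := by
  intro k
  generalize hm : grid.length - k = m
  induction m generalizing k with
  | zero =>
    intro routes st hk h
    have hk' : k = grid.length := by omega
    subst hk'
    rw [PySem.List.pyRange_one_eq_nil (le_refl _), List.drop_length]
    simpa using h
  | succ m ihm =>
    intro routes st hk h
    have hlt : k < grid.length := by omega
    rw [PySem.List.pyRange_one_cons (by exact_mod_cast hlt),
        List.drop_eq_getElem_cons hlt]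
    simp only [List.foldl_cons]
    rw [show PySem.List.pyGetD grid (k : Int) [] = grid[k] by
      rw [PySem.List.pyGetD_natCast]; exact List.getD_eq_getElem grid [] hlt]
    have hstep := pv_row_preserve n (k : Int) grid[k] h
    rw [show ((k : Int) + 1) = ((k + 1 : Nat) : Int) by push_cast; ring] at hstep ⊢
    exact ihm (k + 1) (by omega) _ _ (by omega) hstep

-- entry pass as a filterMap over the pair indices
def pvPairSel (row0 : List Int) (c : Int) : Option PvRoute :=
  if pvGetI row0 c = 1 ∧ pvGetI row0 (c + 1) = 1 then some ⟨1, c, c, 1⟩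
  else if pvGetI row0 c = -1 ∧ pvGetI row0 (c + 1) = -1 then some ⟨1, c, c + 1, -1⟩
  else none

def pvH (x : PvRoute) : Int × Int := (x.ap, if x.dir = 1 then x.c + 1 else x.c)

theorem pv_entry_foldl (row0 : List Int) :
    ∀ (l : List Int) (acc : List PvRoute),
      l.foldl (fun acc c =>
        if pvGetI row0 c = 1 ∧ pvGetI row0 (c + 1) = 1 then acc ++ [⟨1, c, c, 1⟩]
        else if pvGetI row0 c = -1 ∧ pvGetI row0 (c + 1) = -1 then acc ++ [⟨1, c, c + 1, -1⟩]
        else acc) acc = acc ++ l.filterMap (pvPairSel row0) := by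
  intro l
  induction l with
  | nil => intro acc; simp
  | cons c cs ih =>
    intro acc
    simp only [List.foldl_cons, List.filterMap_cons]
    unfold pvPairSel
    split_ifs with hx hy <;> simp [ih] <;> rfl

theorem pvSurv_map_some :
    ∀ (a b : Int), pvSurv a ((PySem.List.pyRange a b 1).map some) =
      (PySem.List.pyRange a b 1).map (fun i => (i, i)) := by
  intro a b
  by_cases hab : a < b
  · have : ((b - (a + 1)).toNat < (b - a).toNat) := by omega
    rw [PySem.List.pyRange_one_cons hab]
    simp only [List.map_cons, pvSurv]
    rw [pvSurv_map_some (a + 1) b]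
  · rw [PySem.List.pyRange_one_eq_nil (by omega)]
    rfl
termination_by a b => (b - a).toNat
decreasing_by omega

theorem pv_entry_scan (row0 : List Int) (n : Int) :
    ∀ (k : Nat), (k : Int) ≤ n - 1 →
      (PySem.List.pyRange 0 ((k : Int) + 1) 1).filterMap
          (fun i => (pvStepB n row0 i).map (fun p => (i, p))) =
        ((PySem.List.pyRange 0 (k : Int) 1).filterMap (pvPairSel row0)).map pvH ++
          (if (k : Int) + 1 < n ∧ pvGetI row0 (k : Int) = 1 ∧ pvGetI row0 ((k : Int) + 1) = 1
            then [((k : Int), (k : Int) + 1)] else []) := by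
  intro k
  induction k with
  | zero =>
    intro _
    simp only [Nat.cast_zero, zero_add]
    rw [PySem.List.pyRange_one_eq_nil (le_refl 0),
        PySem.List.pyRange_one_cons (by omega : (0:Int) < 1),
        show (0:Int) + 1 = 1 by ring,
        PySem.List.pyRange_one_eq_nil (le_refl 1)]
    unfold pvStepB
    simp only [List.filterMap_cons, List.filterMap_nil]
    rw [show (0:Int) - 1 = -1 by ring]
    simp only [show (0:Int) + 1 = 1 by ring]
    split_ifs <;> first | rfl | (exfalso; omega)
  | succ k ih =>
    intro hk
    push_cast at hk ⊢
    rw [PySem.List.pyRange_one_succ_right (by omega : (0:Int) ≤ (k:Int) + 1),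
        List.filterMap_append, ih (by omega),
        PySem.List.pyRange_one_succ_right (by omega : (0:Int) ≤ (k:Int)),
        List.filterMap_append, List.map_append]
    simp only [List.append_assoc]
    congr 1
    unfold pvStepB pvPairSel pvH
    simp only [List.filterMap_cons, List.filterMap_nil]
    rw [show (k:Int) + 1 + 1 = (k:Int) + 2 by ring,
        show (k:Int) + 1 - 1 = (k:Int) by ring]
    simp only [show ((k:Int) + 1 < n ∧ pvGetI row0 (k:Int) = 1 ∧ pvGetI row0 ((k:Int) + 1) = 1) ↔
          (pvGetI row0 (k:Int) = 1 ∧ pvGetI row0 ((k:Int) + 1) = 1) from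
        ⟨fun ⟨_, a, b⟩ => ⟨a, b⟩, fun ⟨a, b⟩ => ⟨by omega, a, b⟩⟩,
      show ((k:Int) ≥ 0 ∧ pvGetI row0 ((k:Int) + 1) = -1 ∧ pvGetI row0 (k:Int) = -1) ↔
          (pvGetI row0 (k:Int) = -1 ∧ pvGetI row0 ((k:Int) + 1) = -1) from
        ⟨fun ⟨_, a, b⟩ => ⟨b, a⟩, fun ⟨a, b⟩ => ⟨by omega, b, a⟩⟩]
    split_ifs <;> first | rfl | (exfalso; omega)

theorem pv_entry (row0 : List Int) (n : Int) :
    List.Forall₂ (PvRel n 1)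
      ((PySem.List.pyRange 0 (n - 1) 1).filterMap (pvPairSel row0))
      (pvSurv 0 (((PySem.List.pyRange 0 n 1).map some).map
        (fun o => o.bind (pvStepB n row0)))) := by
  rw [pvSurv_map_bind, pvSurv_map_some 0 n, List.filterMap_map]
  by_cases hn : n ≤ 0
  · rw [PySem.List.pyRange_one_eq_nil (by omega : n - 1 ≤ 0),
        PySem.List.pyRange_one_eq_nil (by omega : n ≤ 0)]
    exact List.Forall₂.nil
  · obtain ⟨k, hk⟩ : ∃ k : Nat, (k : Int) = n - 1 := ⟨(n - 1).toNat, by omega⟩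
    have hscan := pv_entry_scan row0 n k (by omega)
    rw [hk, show n - 1 + 1 = n by ring,
        if_neg (by rintro ⟨hb, -, -⟩; omega)] at hscan
    rw [List.append_nil] at hscan
    have : (PySem.List.pyRange 0 n 1).filterMap
        ((fun ip => Option.map (fun p => (ip.1, p)) (pvStepB n row0 ip.2)) ∘ fun i => (i, i)) =
        (PySem.List.pyRange 0 n 1).filterMap
          (fun i => Option.map (fun p => (i, p)) (pvStepB n row0 i)) := rfl
    rw [this, hscan, List.forall₂_map_right_iff, List.forall₂_same]
    intro x hx
    obtain ⟨c, hc, hsel⟩ := List.mem_filterMap.1 hx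
    have hcr := PySem.List.mem_pyRange_one.1 hc
    unfold pvPairSel at hsel
    split_ifs at hsel with h1 h2 <;> cases hsel
    · exact ⟨rfl, rfl, Or.inl (by simp only [pvH]; norm_num; omega)⟩
    · exact ⟨rfl, rfl, Or.inr (by simp only [pvH]; norm_num; omega)⟩

theorem pv_foldl_rel {α β γ : Type} {R : α → β → Prop} {f : γ → α → γ} {g : γ → β → γ}
    (H : ∀ acc a b, R a b → f acc a = g acc b) :
    ∀ {as : List α} {bs : List β}, List.Forall₂ R as bs →
      ∀ acc, as.foldl f acc = bs.foldl g acc := by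
  intro as bs hab
  induction hab with
  | nil => intro acc; rfl
  | @cons a b as' bs' h1 h2 ih =>
    intro acc
    simp only [List.foldl_cons, H acc a b h1, ih]

theorem pvSetI_append (pre suf : List Int) (b v : Int) :
    pvSetI (pre ++ b :: suf) (pre.length : Int) v = pre ++ v :: suf := by
  unfold pvSetI
  rw [if_pos (by constructor <;> simp)]
  rw [show ((pre.length : Int)).toNat = pre.length from rfl]
  rw [List.set_append, if_neg (by omega)]
  simp

theorem pv_write :
    ∀ (st : List (Option Int)) (pre : List Int),
      (pvSurv (pre.length : Int) st).foldl (fun ans ip => pvSetI ans ip.1 ip.2)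
          (pre ++ List.replicate st.length (-1)) =
        pre ++ st.map (fun o => o.getD (-1)) := by
  intro st
  induction st with
  | nil => intro pre; simp [pvSurv]
  | cons o t ih =>
    intro pre
    cases o with
    | none =>
      have h1 := ih (pre ++ [(-1 : Int)])
      simp only [List.length_append, List.length_cons] at h1 ⊢
      simp only [pvSurv, List.replicate_succ]
      rw [show (pre.length : Int) + 1 = ((pre.length + 1 : Nat) : Int) by push_cast; ring] at *
      simpa using h1
    | some p =>
      have h1 := ih (pre ++ [p])
      simp only [pvSurv, List.replicate_succ, List.foldl_cons, List.length_cons]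
      rw [pvSetI_append]
      rw [show (pre.length : Int) + 1 = ((pre.length + 1 : Nat) : Int) by push_cast; ring]
      simpa using h1

theorem pv_fold_length (n : Int) :
    ∀ (rows : List (List Int)) (st : List (Option Int)),
      (rows.foldl (fun cols row => cols.map (fun o => o.bind (pvStepB n row))) st).length =
        st.length := by
  intro rows
  induction rows with
  | nil => intro st; rfl
  | cons r rs ih => intro st; rw [List.foldl_cons, ih, List.length_map]

theorem pv_write_rel (n m : Int) {routes : List PvRoute} {st : List (Option Int)}
    (h : List.Forall₂ (PvRel n m) routes (pvSurv 0 st)) (hlen : st.length = n.toNat) :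
    routes.foldl (fun ans x =>
        if x.dir = 1 then pvSetI ans x.ap (x.c + 1) else pvSetI ans x.ap x.c)
      (List.replicate n.toNat (-1)) = st.map (fun o => o.getD (-1)) := by
  rw [pv_foldl_rel (g := fun ans ip => pvSetI ans ip.1 ip.2) ?_ h (List.replicate n.toNat (-1))]
  · have := pv_write st []
    simp only [List.length_nil, Nat.cast_zero, List.nil_append] at this
    rw [hlen] at this
    exact this
  · intro acc a b hab
    obtain ⟨-, hap, hor⟩ := hab
    rcases hor with ⟨hd, hc, -, -⟩ | ⟨hd, hc, -, -⟩
    · rw [if_pos hd, hap, show a.c + 1 = b.2 by omega]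
    · rw [if_neg (by rw [hd]; norm_num), hap, hc]

-- ===== VERDICT (by name: the statement is the Claim_ definition above) =====
theorem findBall_spec : Claim_equal_findBall := by
  intro grid _ hpre
  obtain ⟨hne, hlen⟩ := hpre
  unfold Spec_findBall
  cases grid with
  | nil => exact absurd rfl hne
  | cons row0 rest =>
    unfold findBall findBall_alt
    dsimp only
    have hrow0 : PySem.List.pyGetD (row0 :: rest) (0 : Int) [] = row0 := by
      rw [PySem.List.pyGetD_eq_getElem _ _ (by omega) (by simp)]; rfl
    rw [hrow0]
    set n : Int := (row0.length : Int) with hn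
    rw [pv_entry_foldl row0 _ []]
    rw [List.nil_append, List.foldl_cons]
    -- correspondence after the entry pass / first row
    have h1 := pv_entry row0 n
    -- run the remaining rows on both sides
    have hout := pv_outer n (row0 :: rest) 1
      ((PySem.List.pyRange 0 (n - 1) 1).filterMap (pvPairSel row0))
      (((PySem.List.pyRange 0 n 1).map some).map (fun o => o.bind (pvStepB n row0)))
      (by simp) (by simpa using h1)
    rw [Nat.cast_one] at hout
    simp only [List.drop_succ_cons, List.drop_zero] at hout
    -- write the surviving routes into the answer = map getD over the final state
    exact pv_write_rel n ((row0 :: rest).length : Int) hout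
      (by simp [pv_fold_length, PySem.List.length_pyRange_one])
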